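-- pv_equiv track=rewrite | github.com/jtthachil/parsing | domain_parser.py | is_it_news
-- ===== SOURCE A (Python) =====
-- def is_it_news(domain_to_check_for_news) :
--
--     news_websites = ["nytimes.com", "washingtonpost.com", "usatoday.com", "latimes.com", "wsj.com", "chicagotribune.com", "bostonglobe.com","nypost.com",
--                      "sfchronicle.com", "miamiherald.com","dallasnews.com", "houstonchronicle.com", "inquirer.com", "theguardian.com", "thetimes.co.uk",
--                      "telegraph.co.uk", "independent.co.uk", "dailymail.co.uk", "thesun.co.uk", "mirror.co.uk", "ft.com", "scotsman.com", "standard.co.uk", "inews.co.uk",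
--                      "metro.co.uk", "express.co.uk"]
--
--     news_websites_with_http = []
--
--     for news_website in news_websites :
--         news_websites_with_http.append("http://" + news_website)
--         news_websites_with_http.append("http://www." + news_website)
--         news_websites_with_http.append("https://" + news_website)
--         news_websites_with_http.append("https://www." + news_website)
--
--     if domain_to_check_for_news.startswith(tuple(news_websites)) or domain_to_check_for_news.startswith(tuple(news_websites_with_http)) :
--         return True
--
--     return False
-- ===== SOURCE B (Python) =====
-- def is_it_news(domain_to_check_for_news):
--
--     news_websites = ["nytimes.com", "washingtonpost.com", "usatoday.com", "latimes.com", "wsj.com", "chicagotribune.com", "bostonglobe.com","nypost.com",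
--                      "sfchronicle.com", "miamiherald.com","dallasnews.com", "houstonchronicle.com", "inquirer.com", "theguardian.com", "thetimes.co.uk",
--                      "telegraph.co.uk", "independent.co.uk", "dailymail.co.uk", "thesun.co.uk", "mirror.co.uk", "ft.com", "scotsman.com", "standard.co.uk", "inews.co.uk",
--                      "metro.co.uk", "express.co.uk"]
--
--     for prefix in ("http://www.", "https://www.", "http://", "https://"):
--         if domain_to_check_for_news.startswith(prefix):
--             domain_to_check_for_news = domain_to_check_for_news[len(prefix):]
--             break
--
--     return domain_to_check_for_news.startswith(tuple(news_websites))
-- ===== Notes on version B (the rewrite author's own statement) =====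
-- stated objective: simpler
-- what changed: Instead of materializing a 4x-expanded list of http/https(+www.) prefixed variants of every news site and doing two tuple-startswith checks, B normalizes the input by stripping the first matching scheme prefix (longest, www. forms first) and does a single startswith check against the base list.
import Mathlib
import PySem

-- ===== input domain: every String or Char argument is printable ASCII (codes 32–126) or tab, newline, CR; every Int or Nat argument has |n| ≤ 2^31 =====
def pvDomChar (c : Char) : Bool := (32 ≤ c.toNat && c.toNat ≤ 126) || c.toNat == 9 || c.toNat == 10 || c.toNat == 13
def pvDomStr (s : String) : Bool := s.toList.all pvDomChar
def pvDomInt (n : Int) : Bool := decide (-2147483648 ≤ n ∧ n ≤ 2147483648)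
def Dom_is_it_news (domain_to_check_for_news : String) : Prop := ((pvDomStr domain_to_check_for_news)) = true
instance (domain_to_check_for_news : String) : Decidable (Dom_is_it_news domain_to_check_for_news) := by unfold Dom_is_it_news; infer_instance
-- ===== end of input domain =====

-- B replaces A's 4×-expanded http/https prefix table by normalizing the input (strip one scheme
-- prefix, longest first) followed by a single startswith check over the base list (objective: simpler).

-- ===== PORT A =====
-- the base list of news sites, written out verbatim in both Python versions
def newsWebsites : List String :=
  ["nytimes.com", "washingtonpost.com", "usatoday.com", "latimes.com", "wsj.com", "chicagotribune.com", "bostonglobe.com", "nypost.com",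
   "sfchronicle.com", "miamiherald.com", "dallasnews.com", "houstonchronicle.com", "inquirer.com", "theguardian.com", "thetimes.co.uk",
   "telegraph.co.uk", "independent.co.uk", "dailymail.co.uk", "thesun.co.uk", "mirror.co.uk", "ft.com", "scotsman.com", "standard.co.uk", "inews.co.uk",
   "metro.co.uk", "express.co.uk"]

def is_it_news (domain_to_check_for_news : String) : Bool :=
  let news_websites := newsWebsites
  let news_websites_with_http : List String :=
    news_websites.foldl (fun acc news_website =>
      acc ++ ["http://" ++ news_website, "http://www." ++ news_website,
              "https://" ++ news_website, "https://www." ++ news_website]) []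
  if news_websites.any (fun p => PySem.Str.startswith domain_to_check_for_news p)
      || news_websites_with_http.any (fun p => PySem.Str.startswith domain_to_check_for_news p) then
    true
  else
    false

-- ===== PORT B =====
def is_it_news_alt (domain_to_check_for_news : String) : Bool :=
  -- the for-loop over the 4 prefixes with break = first matching branch wins
  let d :=
    if PySem.Str.startswith domain_to_check_for_news "http://www." then
      PySem.Str.slice domain_to_check_for_news (some 11) none
    else if PySem.Str.startswith domain_to_check_for_news "https://www." then
      PySem.Str.slice domain_to_check_for_news (some 12) none
    else if PySem.Str.startswith domain_to_check_for_news "http://" then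
      PySem.Str.slice domain_to_check_for_news (some 7) none
    else if PySem.Str.startswith domain_to_check_for_news "https://" then
      PySem.Str.slice domain_to_check_for_news (some 8) none
    else domain_to_check_for_news
  newsWebsites.any (fun p => PySem.Str.startswith d p)

-- ===== PRECONDITION & SPEC =====
def Spec_is_it_news (domain_to_check_for_news : String) (out : Bool) : Prop := out = is_it_news_alt domain_to_check_for_news
instance (domain_to_check_for_news : String) (out : Bool) : Decidable (Spec_is_it_news domain_to_check_for_news out) := by unfold Spec_is_it_news; infer_instance

-- ===== CLAIM (what is proved, stated in full; the proofs are below) =====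
def Claim_equal_is_it_news : Prop := ∀ (domain_to_check_for_news : String), Dom_is_it_news domain_to_check_for_news → Spec_is_it_news domain_to_check_for_news (is_it_news domain_to_check_for_news)

-- ===== LEMMAS AND PROOFS =====

-- "x starts with one of the base news sites"
def bC (x : List Char) : Bool := newsWebsites.any (fun w => PySem.Chars.startswith x w.toList)

theorem prefix_append_iff' (p q s : List Char) : p ++ q <+: s ↔ p <+: s ∧ q <+: s.drop p.length := by
  constructor
  · rintro ⟨t, rfl⟩
    refine ⟨⟨q ++ t, by simp⟩, ⟨t, ?_⟩⟩
    rw [List.append_assoc, List.drop_left]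
  · rintro ⟨⟨t, rfl⟩, hq⟩
    rw [List.drop_left] at hq
    obtain ⟨u, rfl⟩ := hq
    exact ⟨u, by simp⟩

theorem sw_append (d p w : List Char) :
    PySem.Chars.startswith d (p ++ w)
      = (PySem.Chars.startswith d p && PySem.Chars.startswith (d.drop p.length) w) := by
  rw [Bool.eq_iff_iff]
  simp [PySem.Chars.startswith_iff, prefix_append_iff']

theorem sw_false_of (d p q : List Char) (hpd : p <+: d) (h1 : ¬ q <+: p) (h2 : ¬ p <+: q) :
    PySem.Chars.startswith d q = false := by
  cases hq : PySem.Chars.startswith d q with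
  | false => rfl
  | true =>
    exfalso
    have hqd : q <+: d := (PySem.Chars.startswith_iff _ _).mp hq
    rcases List.prefix_or_prefix_of_prefix hqd hpd with h | h
    · exact h1 h
    · exact h2 h

theorem base_false (d p : List Char) (hpd : p <+: d)
    (hall : newsWebsites.all (fun w => !(w.toList.isPrefixOf p) && !(p.isPrefixOf w.toList)) = true) :
    bC d = false := by
  unfold bC
  rw [List.any_eq_false]
  intro w hw
  have h := List.all_eq_true.mp hall w hw
  simp only [Bool.and_eq_true, Bool.not_eq_eq_eq_not, Bool.not_true] at h
  simp only [Bool.not_eq_true]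
  refine sw_false_of d p w.toList hpd (fun hc => ?_) (fun hc => ?_)
  · rw [← List.isPrefixOf_iff_prefix] at hc; rw [h.1] at hc; exact Bool.false_ne_true hc
  · rw [← List.isPrefixOf_iff_prefix] at hc; rw [h.2] at hc; exact Bool.false_ne_true hc

theorem any_or4 {α : Type} (l : List α) (f g h k : α → Bool) :
    l.any (fun x => f x || (g x || (h x || k x))) = (l.any f || (l.any g || (l.any h || l.any k))) := by
  induction l with
  | nil => simp
  | cons a t ih =>
    simp only [List.any_cons, ih]
    cases f a <;> cases g a <;> cases h a <;> cases k a <;> simp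

theorem any_and_const {α : Type} (l : List α) (c : Bool) (f : α → Bool) :
    l.any (fun x => c && f x) = (c && l.any f) := by
  cases c <;> simp

-- the char-level heart of the equivalence: A's expanded check = B's strip-then-check
theorem mainC (dL : List Char) :
    (bC dL || newsWebsites.any (fun w =>
        PySem.Chars.startswith dL ("http://".toList ++ w.toList)
        || (PySem.Chars.startswith dL ("http://www.".toList ++ w.toList)
        || (PySem.Chars.startswith dL ("https://".toList ++ w.toList)
        || PySem.Chars.startswith dL ("https://www.".toList ++ w.toList)))))
    = (if PySem.Chars.startswith dL "http://www.".toList then bC (dL.drop 11)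
       else if PySem.Chars.startswith dL "https://www.".toList then bC (dL.drop 12)
       else if PySem.Chars.startswith dL "http://".toList then bC (dL.drop 7)
       else if PySem.Chars.startswith dL "https://".toList then bC (dL.drop 8)
       else bC dL) := by
  have l7 : ("http://".toList).length = 7 := by decide
  have l8 : ("https://".toList).length = 8 := by decide
  have l11 : ("http://www.".toList).length = 11 := by decide
  have l12 : ("https://www.".toList).length = 12 := by decide
  simp only [sw_append, l7, l8, l11, l12]
  rw [any_or4 newsWebsites
      (fun w => PySem.Chars.startswith dL "http://".toList && PySem.Chars.startswith (dL.drop 7) w.toList)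
      (fun w => PySem.Chars.startswith dL "http://www.".toList && PySem.Chars.startswith (dL.drop 11) w.toList)
      (fun w => PySem.Chars.startswith dL "https://".toList && PySem.Chars.startswith (dL.drop 8) w.toList)
      (fun w => PySem.Chars.startswith dL "https://www.".toList && PySem.Chars.startswith (dL.drop 12) w.toList),
    any_and_const newsWebsites _ (fun w => PySem.Chars.startswith (dL.drop 7) w.toList),
    any_and_const newsWebsites _ (fun w => PySem.Chars.startswith (dL.drop 11) w.toList),
    any_and_const newsWebsites _ (fun w => PySem.Chars.startswith (dL.drop 8) w.toList),
    any_and_const newsWebsites _ (fun w => PySem.Chars.startswith (dL.drop 12) w.toList)]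
  have hbc : ∀ x, (newsWebsites.any fun w => PySem.Chars.startswith x w.toList) = bC x :=
    fun _ => rfl
  by_cases hhw : PySem.Chars.startswith dL "http://www.".toList = true
  · obtain ⟨r, rfl⟩ := (PySem.Chars.startswith_iff _ _).mp hhw
    have hh : PySem.Chars.startswith ("http://www.".toList ++ r) "http://".toList = true := by
      refine (PySem.Chars.startswith_iff _ _).mpr ⟨"www.".toList ++ r, ?_⟩
      rw [← List.append_assoc]
      rfl
    have hs : PySem.Chars.startswith ("http://www.".toList ++ r) "https://".toList = false :=
      sw_false_of _ "http://www.".toList _ (List.prefix_append _ _) (by decide) (by decide)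
    have hsw : PySem.Chars.startswith ("http://www.".toList ++ r) "https://www.".toList = false :=
      sw_false_of _ "http://www.".toList _ (List.prefix_append _ _) (by decide) (by decide)
    have hb : bC ("http://www.".toList ++ r) = false :=
      base_false _ "http://www.".toList (List.prefix_append _ _) (by decide)
    have hd7 : ("http://www.".toList ++ r).drop 7 = "www.".toList ++ r := by
      rw [List.drop_append_of_le_length (by decide)]
      rfl
    have hd11 : ("http://www.".toList ++ r).drop 11 = r := by
      rw [show (11 : Nat) = ("http://www.".toList).length from rfl, List.drop_left]
    have hb7 : bC ("www.".toList ++ r) = false :=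
      base_false _ "www.".toList (List.prefix_append _ _) (by decide)
    simp only [hbc, hhw, hh, hs, hsw, hb, hd7, hd11, hb7]
    simp
  · by_cases hsw : PySem.Chars.startswith dL "https://www.".toList = true
    · obtain ⟨r, rfl⟩ := (PySem.Chars.startswith_iff _ _).mp hsw
      have hs : PySem.Chars.startswith ("https://www.".toList ++ r) "https://".toList = true := by
        refine (PySem.Chars.startswith_iff _ _).mpr ⟨"www.".toList ++ r, ?_⟩
        rw [← List.append_assoc]
        rfl
      have hh : PySem.Chars.startswith ("https://www.".toList ++ r) "http://".toList = false :=
        sw_false_of _ "https://www.".toList _ (List.prefix_append _ _) (by decide) (by decide)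
      have hb : bC ("https://www.".toList ++ r) = false :=
        base_false _ "https://www.".toList (List.prefix_append _ _) (by decide)
      have hd8 : ("https://www.".toList ++ r).drop 8 = "www.".toList ++ r := by
        rw [List.drop_append_of_le_length (by decide)]
        rfl
      have hd12 : ("https://www.".toList ++ r).drop 12 = r := by
        rw [show (12 : Nat) = ("https://www.".toList).length from rfl, List.drop_left]
      have hb8 : bC ("www.".toList ++ r) = false :=
        base_false _ "www.".toList (List.prefix_append _ _) (by decide)
      simp only [Bool.not_eq_true] at hhw
      simp only [hbc, hhw, hsw, hs, hh, hb, hd8, hd12, hb8]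
      simp
    · by_cases hh : PySem.Chars.startswith dL "http://".toList = true
      · obtain ⟨r, rfl⟩ := (PySem.Chars.startswith_iff _ _).mp hh
        have hs : PySem.Chars.startswith ("http://".toList ++ r) "https://".toList = false :=
          sw_false_of _ "http://".toList _ (List.prefix_append _ _) (by decide) (by decide)
        have hb : bC ("http://".toList ++ r) = false :=
          base_false _ "http://".toList (List.prefix_append _ _) (by decide)
        have hd7 : ("http://".toList ++ r).drop 7 = r := by
          rw [show (7 : Nat) = ("http://".toList).length from rfl, List.drop_left]
        simp only [Bool.not_eq_true] at hhw hsw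
        simp only [hbc, hh, hs, hb, hhw, hsw, hd7]
        simp
      · by_cases hs : PySem.Chars.startswith dL "https://".toList = true
        · obtain ⟨r, rfl⟩ := (PySem.Chars.startswith_iff _ _).mp hs
          have hb : bC ("https://".toList ++ r) = false :=
            base_false _ "https://".toList (List.prefix_append _ _) (by decide)
          have hd8 : ("https://".toList ++ r).drop 8 = r := by
            rw [show (8 : Nat) = ("https://".toList).length from rfl, List.drop_left]
          simp only [Bool.not_eq_true] at hhw hsw hh
          simp only [hbc, hs, hb, hhw, hsw, hh, hd8]
          simp
        · simp only [Bool.not_eq_true] at hhw hsw hh hs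
          simp only [hbc, hhw, hsw, hh, hs]
          simp

theorem if_tf (b : Bool) : (if b = true then true else false) = b := by cases b <;> simp

-- slicing a string from a nonnegative literal bound is dropping that many characters
theorem slice_toList (s : String) (k : Int) (n : Nat) (h : k = (n : Int)) :
    (PySem.Str.slice s (some k) none).toList = s.toList.drop n := by
  subst h
  rw [PySem.Str.toList_slice, PySem.Chars.slice_eq_listSlice, PySem.List.slice_from_natCast]

-- ===== VERDICT (by name: the statement is the Claim_ definition above) =====
theorem is_it_news_spec : Claim_equal_is_it_news := by
  intro d _
  unfold Spec_is_it_news is_it_news is_it_news_alt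
  simp only [PySem.List.foldl_append_eq_flatMap, List.nil_append, List.any_flatMap,
    PySem.Str.startswith_eq, List.any_cons, List.any_nil, Bool.or_false, String.toList_append]
  rw [show (newsWebsites.any fun p => PySem.Chars.startswith d.toList p.toList)
      = bC d.toList from rfl]
  rw [mainC d.toList]
  have e7 := slice_toList d 7 7 rfl
  have e8 := slice_toList d 8 8 rfl
  have e11 := slice_toList d 11 11 rfl
  have e12 := slice_toList d 12 12 rfl
  rw [if_tf]
  by_cases h1 : PySem.Chars.startswith d.toList "http://www.".toList = true
  · simp only [if_pos h1, e11]; rfl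
  · simp only [if_neg h1]
    by_cases h2 : PySem.Chars.startswith d.toList "https://www.".toList = true
    · simp only [if_pos h2, e12]; rfl
    · simp only [if_neg h2]
      by_cases h3 : PySem.Chars.startswith d.toList "http://".toList = true
      · simp only [if_pos h3, e7]; rfl
      · simp only [if_neg h3]
        by_cases h4 : PySem.Chars.startswith d.toList "https://".toList = true
        · simp only [if_pos h4, e8]; rfl
        · simp only [if_neg h4]; rfl
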